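-- pv_equiv track=rewrite | github.com/hellomifans/ctftool | pmq.py | FENSE
-- ===== SOURCE A (Python) =====
-- def FENSE(s):
-- 	slist=[]
-- 	for i in range(len(s)):
-- 		s1=""
-- 		for j in range(i):
-- 			s1+=s[j::i]
-- 		slist.append(s1)
-- 	slist.pop(0)
-- 	return slist
-- ===== SOURCE B (Python) =====
-- def _row(s, i):
--     # one linear pass: bucket every character by its index residue mod i
--     buckets = [[] for _ in range(i)]
--     for k, ch in enumerate(s):
--         buckets[k % i].append(ch)
--     return ''.join(ch for b in buckets for ch in b)
--
--
-- def FENSE(s):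
--     return [_row(s, i) for i in range(1, len(s))]
-- ===== Notes on version B (the rewrite author's own statement) =====
-- stated objective: alternative
-- what changed: Each rearrangement is built by a single residue-bucketing pass over the string (one bucket per column, indexed by k % i) instead of concatenating i strided slices s[j::i]; the i=0 dummy entry and the pop(0) disappear because the loop starts at 1.
import Mathlib
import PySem

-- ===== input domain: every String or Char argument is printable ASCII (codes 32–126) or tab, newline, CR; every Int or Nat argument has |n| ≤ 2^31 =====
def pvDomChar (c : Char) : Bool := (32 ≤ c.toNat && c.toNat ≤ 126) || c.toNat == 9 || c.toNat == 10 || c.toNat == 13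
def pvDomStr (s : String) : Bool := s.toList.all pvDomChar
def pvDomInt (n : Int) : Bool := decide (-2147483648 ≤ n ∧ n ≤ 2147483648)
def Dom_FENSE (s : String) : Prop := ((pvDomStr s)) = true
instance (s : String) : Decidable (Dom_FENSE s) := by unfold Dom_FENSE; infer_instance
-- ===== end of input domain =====

-- B builds each rearrangement by one residue-bucketing pass instead of i strided slices (alternative decomposition, same cost).

-- ===== PORT A =====
def FENSE (s : String) : List String :=
  let n : Int := PySem.Str.len s
  let slist := (PySem.List.pyRange 0 n 1).foldl (fun slist i =>
    let s1 := (PySem.List.pyRange 0 i 1).foldl (fun s1 j =>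
      -- s1 += s[j::i]; whenever this body runs, j < i so the step i ≥ 1 and slice? is `some`
      s1 ++ ((PySem.Str.slice? s (some j) none i).getD "")) ""
    slist ++ [s1]) ([] : List String)
  -- slist.pop(0) discards the first element; on s = "" Python raises IndexError (excluded by Pre_)
  slist.drop 1

-- ===== PORT B =====
def FENSE_row (cs : List Char) (i : Nat) : String :=
  let buckets : List (List Char) := (List.range i).map (fun _ => ([] : List Char))
  -- for k, ch in enumerate(s): buckets[k % i].append(ch)   (zipIdx pairs are (ch, k))
  let buckets := cs.zipIdx.foldl (fun bs p => bs.modify (p.2 % i) (fun b => b ++ [p.1])) buckets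
  String.ofList (buckets.flatMap (fun b => b))

def FENSE_alt (s : String) : List String :=
  (List.range' 1 (s.toList.length - 1)).map (fun i => FENSE_row s.toList i)

-- ===== PRECONDITION & SPEC =====
-- Pre_ excludes only the empty string, on which A's slist.pop(0) raises IndexError.
def Pre_FENSE (s : String) : Prop := s ≠ ""
instance (s : String) : Decidable (Pre_FENSE s) := by unfold Pre_FENSE; infer_instance
def pvWitness_FENSE : String := "ab"

def Spec_FENSE (s : String) (out : List String) : Prop := out = FENSE_alt s
instance (s : String) (out : List String) : Decidable (Spec_FENSE s out) := by unfold Spec_FENSE; infer_instance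

-- ===== CLAIM (what is proved, stated in full; the proofs are below) =====
def Claim_equal_FENSE : Prop := ∀ (s : String), Dom_FENSE s → Pre_FENSE s → Spec_FENSE s (FENSE s)

-- ===== LEMMAS AND PROOFS =====

-- the j-th residue column: the characters of cs whose index is ≡ j (mod i), in order
def residR (cs : List Char) (i j : Nat) : List Char :=
  (List.range cs.length).filterMap (fun k => if k % i = j then cs[k]? else none)

theorem filterMap_range_small (cs : List Char) (i j : Nat) (hj : j < i) :
    ∀ (m : Nat), m ≤ i →
      (List.range m).filterMap (fun k => if k % i = j then cs[k]? else none)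
        = if j < m then cs[j]?.toList else [] := by
  intro m
  induction m with
  | zero => simp
  | succ m ih =>
    intro hm
    rw [List.range_succ, List.filterMap_append, ih (by omega)]
    have hmi : m % i = m := Nat.mod_eq_of_lt (by omega)
    simp only [List.filterMap_cons, List.filterMap_nil, hmi]
    by_cases h : m = j
    · subst h
      simp only [if_neg (Nat.lt_irrefl m), if_pos (Nat.lt_succ_self m), List.nil_append]
      cases cs[m]? <;> simp [Option.toList]
    · have e : (j < m) ↔ (j < m + 1) := by omega
      simp only [if_neg h, List.append_nil, e]

theorem residR_rec (cs : List Char) (i j : Nat) (hj : j < i) (hn : j < cs.length) :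
    residR cs i j = cs[j]?.toList ++ residR (cs.drop i) i j := by
  unfold residR
  by_cases h : i ≤ cs.length
  · have hsplit : cs.length = i + (cs.length - i) := by omega
    rw [hsplit, List.range_add, List.filterMap_append,
      filterMap_range_small cs i j hj i le_rfl, if_pos hj]
    congr 1
    rw [List.filterMap_map, List.length_drop]
    apply List.filterMap_congr
    intro k _
    simp only [Function.comp]
    rw [Nat.add_mod_left, ← List.getElem?_drop]
  · have hd : cs.drop i = [] := List.drop_eq_nil_of_le (by omega)
    rw [hd]
    simp only [List.length_nil, List.range_zero, List.filterMap_nil, List.append_nil]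
    rw [filterMap_range_small cs i j hj cs.length (by omega), if_pos hn]

-- count of the indices j, j+i, j+2i, … below n
def cntR (n i j : Nat) : Nat := if j < n then (((n : Int) - j - 1) / i).toNat + 1 else 0

theorem cntR_rec (n i j : Nat) (hi : 1 ≤ i) (hn : j < n) :
    cntR n i j = cntR (n - i) i j + 1 := by
  unfold cntR
  rw [if_pos hn]
  by_cases h : j < n - i
  · rw [if_pos h]
    have e1 : ((n : Int) - j - 1) = (((n - i : Nat) : Int) - j - 1) + 1 * i := by omega
    rw [e1, Int.add_mul_ediv_right _ _ (by omega : (i : Int) ≠ 0)]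
    have h0 : 0 ≤ (((n - i : Nat) : Int) - j - 1) / i :=
      Int.ediv_nonneg (by omega) (by omega)
    omega
  · rw [if_neg h]
    have : ((n : Int) - j - 1) / i = 0 := Int.ediv_eq_zero_of_lt (by omega) (by omega)
    omega

theorem stride_eq_residR (i j : Nat) (hi : 1 ≤ i) (hj : j < i) :
    ∀ (n : Nat) (cs : List Char), cs.length = n →
      (List.range (cntR n i j)).filterMap (fun k => cs[j + i * k]?) = residR cs i j := by
  intro n
  induction n using Nat.strong_induction_on with
  | _ n ih =>
    intro cs hlen
    by_cases hn : j < n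
    · rw [cntR_rec n i j hi hn]
      have hr : List.range (cntR (n - i) i j + 1)
          = List.range 1 ++ (List.range (cntR (n - i) i j)).map (fun x => 1 + x) := by
        rw [← List.range_add]; congr 1; omega
      rw [hr, List.filterMap_append, List.filterMap_map]
      have h1 : (List.range 1).filterMap (fun k => cs[j + i * k]?) = cs[j]?.toList := by
        simp only [List.range_one, List.filterMap_cons, List.filterMap_nil, Nat.mul_zero,
          Nat.add_zero]
        cases cs[j]? <;> simp [Option.toList]
      rw [h1]
      have h3 : (List.range (cntR (n - i) i j)).filterMap ((fun k => cs[j + i * k]?) ∘ (fun x => 1 + x))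
          = (List.range (cntR (n - i) i j)).filterMap (fun k => (cs.drop i)[j + i * k]?) := by
        apply List.filterMap_congr
        intro k _
        simp only [Function.comp]
        rw [List.getElem?_drop]
        congr 1
        ring
      rw [h3, ih (n - i) (by omega) (cs.drop i) (by simp [hlen]),
        residR_rec cs i j hj (by omega)]
    · have hc : cntR n i j = 0 := by unfold cntR; rw [if_neg hn]
      rw [hc]
      simp only [List.range_zero, List.filterMap_nil]
      unfold residR
      rw [hlen, filterMap_range_small cs i j hj n (by omega), if_neg hn]

theorem slice?_eq_residR (cs : List Char) (i j : Nat) (hi : 1 ≤ i) (hj : j < i) :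
    PySem.List.slice? cs (some (j : Int)) none (i : Int) = some (residR cs i j) := by
  unfold PySem.List.slice? PySem.List.sliceIndices
  have hi0 : ¬((i : Int) = 0) := by omega
  have hineg : ¬((i : Int) < 0) := by omega
  have hjneg : ¬((j : Int) < 0) := by omega
  have hipos : (0 : Int) < i := by omega
  simp only [hi0, hineg, hjneg, hipos, if_false, if_true]
  by_cases hb : j < cs.length
  · have hmin : min (j : Int) (cs.length : Int) = (j : Int) := by omega
    rw [hmin, if_pos (by omega : ((j : Int) < (cs.length : Int)))]
    have hq : 0 ≤ ((cs.length : Int) - j - 1) / i := Int.ediv_nonneg (by omega) (by omega)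
    have hcount : (((cs.length : Int) - j + i - 1) / i).toNat = cntR cs.length i j := by
      have e1 : ((cs.length : Int) - j + i - 1) = ((cs.length : Int) - j - 1) + 1 * i := by ring
      rw [e1, Int.add_mul_ediv_right _ _ (by omega : (i : Int) ≠ 0)]
      unfold cntR
      rw [if_pos hb]
      omega
    rw [hcount]
    have hfun : (fun x : Nat => cs[((j : Int) + i * x).toNat]?) = (fun x : Nat => cs[j + i * x]?) := by
      funext x
      have e : ((j : Int) + i * x).toNat = j + i * x := by omega
      rw [e]
    rw [hfun, stride_eq_residR i j hi hj cs.length cs rfl]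
  · have hmin : min (j : Int) (cs.length : Int) = (cs.length : Int) := by omega
    rw [hmin, if_neg (by omega : ¬((cs.length : Int) < (cs.length : Int)))]
    simp only [List.range_zero, List.filterMap_nil]
    unfold residR
    rw [filterMap_range_small cs i j hj cs.length (by omega), if_neg hb]

theorem zipIdx_filterMap (i r : Nat) :
    ∀ (cs : List Char) (m : Nat),
      (cs.zipIdx m).filterMap (fun p => if p.2 % i = r then some p.1 else none)
        = (List.range cs.length).filterMap (fun k => if (k + m) % i = r then cs[k]? else none) := by
  intro cs
  induction cs with
  | nil => simp
  | cons c t ih =>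
    intro m
    rw [List.zipIdx_cons, List.filterMap_cons]
    have hlen : (c :: t).length = 1 + t.length := by simp [Nat.add_comm]
    have hr : List.range (c :: t).length = List.range 1 ++ (List.range t.length).map (fun x => 1 + x) := by
      rw [hlen, List.range_add]
    rw [hr, List.filterMap_append, List.filterMap_map]
    have h1 : (List.range 1).filterMap (fun k => if (k + m) % i = r then (c :: t)[k]? else none)
        = if m % i = r then [c] else [] := by
      simp only [List.range_one, List.filterMap_cons, List.filterMap_nil, Nat.zero_add]
      by_cases hm : m % i = r <;> simp [hm]
    have h2 : (List.range t.length).filterMap ((fun k => if (k + m) % i = r then (c :: t)[k]? else none) ∘ (fun x => 1 + x))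
        = (List.range t.length).filterMap (fun k => if (k + (m + 1)) % i = r then t[k]? else none) := by
      apply List.filterMap_congr
      intro k _
      simp only [Function.comp]
      have e : 1 + k + m = k + (m + 1) := by omega
      have e2 : (1 : Nat) + k = k + 1 := by omega
      rw [e, e2, List.getElem?_cons_succ]
    rw [h1, h2, ← ih (m + 1)]
    by_cases hm : m % i = r <;> simp [hm]

theorem buckets_foldl (i : Nat) :
    ∀ (ps : List (Char × Nat)) (bs : List (List Char)), (∀ p ∈ ps, p.2 % i < bs.length) →
      ps.foldl (fun bs p => bs.modify (p.2 % i) (fun b => b ++ [p.1])) bs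
        = bs.mapIdx (fun r b => b ++ ps.filterMap (fun p => if p.2 % i = r then some p.1 else none)) := by
  intro ps
  induction ps with
  | nil =>
    intro bs _
    simp only [List.foldl_nil, List.filterMap_nil, List.append_nil]
    apply List.ext_getElem <;> simp
  | cons p t ih =>
    intro bs hlt
    rw [List.foldl_cons, ih _ (by
      intro q hq
      rw [List.length_modify]
      exact hlt q (List.mem_cons_of_mem _ hq))]
    apply List.ext_getElem
    · simp
    · intro k h1 h2
      simp only [List.getElem_mapIdx, List.getElem_modify, List.filterMap_cons]
      by_cases h : p.2 % i = k
      · rw [if_pos h, if_pos h]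
        simp [List.append_assoc]
      · rw [if_neg h, if_neg h]

theorem row_alt_toList (cs : List Char) (i : Nat) (hi : 1 ≤ i) :
    (FENSE_row cs i).toList = (List.range i).flatMap (fun j => residR cs i j) := by
  unfold FENSE_row
  dsimp only
  rw [buckets_foldl i cs.zipIdx _ (by
    intro p _
    simp only [List.length_map, List.length_range]
    exact Nat.mod_lt _ (by omega))]
  have hmx : ((List.range i).map (fun _ => ([] : List Char))).mapIdx
      (fun r b => b ++ cs.zipIdx.filterMap (fun p => if p.2 % i = r then some p.1 else none))
      = (List.range i).map (fun r => cs.zipIdx.filterMap (fun p => if p.2 % i = r then some p.1 else none)) := by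
    apply List.ext_getElem
    · simp
    · intro k h1 h2
      simp [List.getElem_mapIdx]
  rw [hmx]
  have hseg : ∀ r : Nat, cs.zipIdx.filterMap (fun p => if p.2 % i = r then some p.1 else none) = residR cs i r := by
    intro r
    rw [zipIdx_filterMap i r cs 0]
    unfold residR
    simp
  simp only [hseg]
  simp [List.flatMap_def, Function.comp_def]

theorem foldl_append_str {α : Type} (g : α → String) :
    ∀ (l : List α) (a : String),
      (l.foldl (fun acc x => acc ++ g x) a).toList = a.toList ++ l.flatMap (fun x => (g x).toList) := by
  intro l
  induction l with
  | nil => simp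
  | cons x t ih => intro a; simp [ih, String.toList_append]

theorem foldl_append_singleton {α β : Type} (g : α → β) :
    ∀ (l : List α) (a : List β), l.foldl (fun acc x => acc ++ [g x]) a = a ++ l.map g := by
  intro l
  induction l with
  | nil => simp
  | cons x t ih => intro a; simp [ih]

theorem row_A_eq (s : String) (i : Nat) (hi : 1 ≤ i) :
    (PySem.List.pyRange 0 (i : Int) 1).foldl (fun s1 j =>
        s1 ++ ((PySem.Str.slice? s (some j) none (i : Int)).getD "")) ""
      = FENSE_row s.toList i := by
  apply String.toList_inj.mp
  rw [foldl_append_str, row_alt_toList s.toList i hi]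
  have hrange : PySem.List.pyRange 0 (i : Int) 1 = (List.range i).map (fun k => ((k : Nat) : Int)) := by
    rw [PySem.List.pyRange_one]
    simp
  rw [hrange, List.flatMap_map]
  rw [List.flatMap_def, List.flatMap_def]
  simp only [String.toList_empty, List.nil_append]
  congr 1
  apply List.map_congr_left
  intro j hj
  have hji : j < i := List.mem_range.mp hj
  unfold PySem.Str.slice?
  rw [PySem.Chars.slice?_eq_listSlice?, slice?_eq_residR s.toList i j hi hji]
  simp

-- ===== VERDICT (by name: the statement is the Claim_ definition above) =====
theorem FENSE_spec : Claim_equal_FENSE := by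
  intro s _ hpre
  unfold Spec_FENSE FENSE FENSE_alt
  dsimp only
  have hne : s.toList ≠ [] := fun he => hpre (String.toList_inj.mp (by simp [he]))
  have hlen1 : 1 ≤ s.toList.length := List.length_pos_iff.mpr hne
  have hlenS : PySem.Str.len s = (s.toList.length : Int) := rfl
  rw [hlenS, PySem.List.pyRange_one]
  have htn : (((s.toList.length : Int) - 0).toNat) = s.toList.length := by omega
  rw [htn]
  rw [foldl_append_singleton]
  simp only [List.nil_append]
  have hsplit : List.range s.toList.length
      = List.range 1 ++ (List.range (s.toList.length - 1)).map (fun x => 1 + x) := by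
    rw [← List.range_add]; congr 1; omega
  rw [hsplit, List.map_append]
  rw [List.range'_eq_map_range]
  simp only [List.range_one, List.map_cons, List.map_nil, List.cons_append, List.drop_succ_cons,
    List.drop_zero, List.map_map, List.nil_append]
  apply List.map_congr_left
  intro k _
  simp only [Function.comp]
  have hz : ((0 : Int) + ↑(1 + k)) = (((1 + k : Nat)) : Int) := by omega
  rw [hz, row_A_eq s (1 + k) (by omega)]
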